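-- pv_equiv track=rewrite | github.com/JDZW2014/python_full_stack | src/_4_data_structure/p12/补充一些字符串的练习题.py | func13
-- ===== SOURCE A (Python) =====
-- def func13(str1, str2, i, j, cache):
--     _k = f"{i}_{j}"
--     if _k in cache:
--         return cache[_k]
--
--     if i < 0 or j < 0:
--         max_len = 0
--     else:
--         if str1[i] == str2[j]:
--             max_len = func13(str1, str2, i-1, j-1, cache) + 1
--         else:
--             func13(str1, str2, i-1, j, cache)
--             func13(str1, str2, i, j - 1, cache)
--             max_len = 0
--     cache[_k] = max_len
--     return max_len
-- ===== SOURCE B (Python) =====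
-- def func13(str1, str2, i, j, cache):
--     # Walk backward along the diagonal counting matches; consults the given
--     # cache (first hit on the diagonal short-circuits) but does not write to it.
--     k = 0
--     while True:
--         key = f"{i - k}_{j - k}"
--         if key in cache:
--             return cache[key] + k
--         if i - k < 0 or j - k < 0 or str1[i - k] != str2[j - k]:
--             return k
--         k += 1
-- ===== Notes on version B (the rewrite author's own statement) =====
-- stated objective: faster
-- what changed: Replaced the memoized two-dimensional recursion (which also explores and fills the whole i x j grid on a mismatch) by a single backward walk along the diagonal that counts matching characters, consulting the given cache at each diagonal cell; B reads the cache but never writes to it (return-value equivalence only).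
import Mathlib
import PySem

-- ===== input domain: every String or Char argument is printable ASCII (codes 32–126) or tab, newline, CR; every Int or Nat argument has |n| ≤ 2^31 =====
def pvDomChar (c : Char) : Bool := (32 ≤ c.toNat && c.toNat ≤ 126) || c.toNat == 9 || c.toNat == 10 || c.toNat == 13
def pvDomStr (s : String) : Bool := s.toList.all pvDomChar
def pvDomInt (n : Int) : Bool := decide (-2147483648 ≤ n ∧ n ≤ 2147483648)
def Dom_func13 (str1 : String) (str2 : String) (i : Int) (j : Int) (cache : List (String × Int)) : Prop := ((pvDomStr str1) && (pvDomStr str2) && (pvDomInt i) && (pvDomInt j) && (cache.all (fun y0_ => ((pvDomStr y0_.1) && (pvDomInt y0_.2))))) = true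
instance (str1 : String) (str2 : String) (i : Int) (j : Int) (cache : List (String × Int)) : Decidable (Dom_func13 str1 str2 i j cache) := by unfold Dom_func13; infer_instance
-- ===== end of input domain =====

-- B replaces A's memoized grid recursion by a backward diagonal walk (faster per the
-- timing run); A mutates the cache dict in place, B only reads it — the equivalence
-- proved here is about the RETURN value only.

-- the Python key f"{i}_{j}"
def pvKey (i : Int) (j : Int) : String := PySem.Int.toStr i ++ "_" ++ PySem.Int.toStr j

-- ===== PORT A =====
-- Returns (value, cache-after); `none` = the Python raises (IndexError).
def func13Aux (str1 : String) (str2 : String) (i : Int) (j : Int)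
    (cache : PySem.Dict String Int) : Option (Int × PySem.Dict String Int) :=
  let k := pvKey i j
  match cache.get? k with
  | some v => some (v, cache)
  | none =>
    if i < 0 ∨ j < 0 then
      some (0, cache.insert k 0)
    else
      match PySem.Str.pyGet? str1 i, PySem.Str.pyGet? str2 j with
      | some c1, some c2 =>
        if c1 = c2 then
          match func13Aux str1 str2 (i - 1) (j - 1) cache with
          | some (v, c') => some (v + 1, c'.insert k (v + 1))
          | none => none
        else
          match func13Aux str1 str2 (i - 1) j cache with
          | none => none
          | some (_, c1') =>
            match func13Aux str1 str2 i (j - 1) c1' with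
            | none => none
            | some (_, c2') => some (0, c2'.insert k 0)
      | _, _ => none
termination_by ((i + 1).toNat + (j + 1).toNat)
decreasing_by all_goals omega

def func13 (str1 : String) (str2 : String) (i : Int) (j : Int) (cache : List (String × Int)) : Int :=
  ((func13Aux str1 str2 i j (PySem.Dict.mk cache)).getD (0, PySem.Dict.mk cache)).1

-- ===== PORT B =====
-- the `while True` loop of Source B; the `| _, _ => k` arm is where the Python would
-- raise IndexError — unreachable under Pre_func13.
def func13AltGo (str1 : String) (str2 : String) (i : Int) (j : Int)
    (cache : PySem.Dict String Int) (k : Int) : Int :=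
  match cache.get? (pvKey (i - k) (j - k)) with
  | some v => v + k
  | none =>
    if i - k < 0 ∨ j - k < 0 then k
    else
      match PySem.Str.pyGet? str1 (i - k), PySem.Str.pyGet? str2 (j - k) with
      | some c1, some c2 => if c1 ≠ c2 then k else func13AltGo str1 str2 i j cache (k + 1)
      | _, _ => k
termination_by (i - k + 1).toNat
decreasing_by omega

def func13_alt (str1 : String) (str2 : String) (i : Int) (j : Int) (cache : List (String × Int)) : Int :=
  func13AltGo str1 str2 i j (PySem.Dict.mk cache) 0

-- ===== PRECONDITION & SPEC =====
-- Exactly the inputs on which the Python A returns (otherwise str1[i] or str2[j]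
-- raises IndexError): the key is already cached, or an index is negative, or both
-- indices are in range.
def Pre_func13 (str1 : String) (str2 : String) (i : Int) (j : Int) (cache : List (String × Int)) : Prop :=
  pvKey i j ∈ cache.map Prod.fst ∨ i < 0 ∨ j < 0 ∨
    (i < (str1.toList.length : Int) ∧ j < (str2.toList.length : Int))
instance (str1 : String) (str2 : String) (i : Int) (j : Int) (cache : List (String × Int)) : Decidable (Pre_func13 str1 str2 i j cache) := by unfold Pre_func13; infer_instance

def pvWitness_func13 : String × String × Int × Int × (List (String × Int)) := ("abc", "xbc", 2, 2, [])

def Spec_func13 (str1 : String) (str2 : String) (i : Int) (j : Int) (cache : List (String × Int)) (out : Int) : Prop := out = func13_alt str1 str2 i j cache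
instance (str1 : String) (str2 : String) (i : Int) (j : Int) (cache : List (String × Int)) (out : Int) : Decidable (Spec_func13 str1 str2 i j cache out) := by unfold Spec_func13; infer_instance

-- ===== CLAIM (what is proved, stated in full; the proofs are below) =====
def Claim_equal_func13 : Prop := ∀ (str1 : String) (str2 : String) (i : Int) (j : Int) (cache : List (String × Int)), Dom_func13 str1 str2 i j cache → Pre_func13 str1 str2 i j cache → Spec_func13 str1 str2 i j cache (func13 str1 str2 i j cache)

-- ===== LEMMAS AND PROOFS =====

lemma pyGet?_isSome (s : String) (i : Int) (h0 : 0 ≤ i) (h : i < (s.toList.length : Int)) :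
    ∃ c, PySem.Str.pyGet? s i = some c := by
  lift i to ℕ using h0 with n
  rw [PySem.Str.pyGet?_natCast]
  exact ⟨s.toList[n]'(by exact_mod_cast h), List.getElem?_eq_getElem _⟩

-- shifting the diagonal-walk counter by one
lemma altGo_shift (str1 str2 : String) (cache : PySem.Dict String Int) :
    ∀ n (i j k : Int), (i - k + 1).toNat ≤ n →
      func13AltGo str1 str2 i j cache (k + 1) =
        func13AltGo str1 str2 (i - 1) (j - 1) cache k + 1 := by
  intro n
  induction n with
  | zero =>
    intro i j k hn
    conv_lhs => rw [func13AltGo]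
    conv_rhs => rw [func13AltGo]
    have h1 : i - (k + 1) = i - 1 - k := by ring
    have h2 : j - (k + 1) = j - 1 - k := by ring
    rw [h1, h2]
    cases hc : cache.get? (pvKey (i - 1 - k) (j - 1 - k)) with
    | some v => show v + (k + 1) = v + k + 1; omega
    | none =>
      have hneg : i - 1 - k < 0 ∨ j - 1 - k < 0 := by omega
      simp only [if_pos hneg]
  | succ m ih =>
    intro i j k hn
    conv_lhs => rw [func13AltGo]
    conv_rhs => rw [func13AltGo]
    have h1 : i - (k + 1) = i - 1 - k := by ring
    have h2 : j - (k + 1) = j - 1 - k := by ring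
    rw [h1, h2]
    cases hc : cache.get? (pvKey (i - 1 - k) (j - 1 - k)) with
    | some v => show v + (k + 1) = v + k + 1; omega
    | none =>
      by_cases hneg : i - 1 - k < 0 ∨ j - 1 - k < 0
      · simp only [if_pos hneg]
      · simp only [if_neg hneg]
        cases hg1 : PySem.Str.pyGet? str1 (i - 1 - k) with
        | none => rfl
        | some c1 =>
          cases hg2 : PySem.Str.pyGet? str2 (j - 1 - k) with
          | none => rfl
          | some c2 =>
            by_cases hne : c1 ≠ c2
            · simp only [if_pos hne]
            · simp only [if_neg hne]
              exact ih i j (k + 1) (by omega)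

-- A's recursion returns (no exception) whenever both indices are below the lengths,
-- for ANY cache.
lemma aux_total (str1 str2 : String) :
    ∀ n (i j : Int) (cache : PySem.Dict String Int),
      (i + 1).toNat + (j + 1).toNat ≤ n →
      i < (str1.toList.length : Int) → j < (str2.toList.length : Int) →
      ∃ p, func13Aux str1 str2 i j cache = some p := by
  intro n
  induction n with
  | zero =>
    intro i j cache hn hi hj
    rw [func13Aux]
    cases hc : cache.get? (pvKey i j) with
    | some v => exact ⟨_, rfl⟩
    | none =>
      have hneg : i < 0 ∨ j < 0 := by omega
      simp only [if_pos hneg]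
      exact ⟨_, rfl⟩
  | succ m ih =>
    intro i j cache hn hi hj
    rw [func13Aux]
    cases hc : cache.get? (pvKey i j) with
    | some v => exact ⟨_, rfl⟩
    | none =>
      by_cases hneg : i < 0 ∨ j < 0
      · simp only [if_pos hneg]; exact ⟨_, rfl⟩
      · push_neg at hneg
        simp only [if_neg (by omega : ¬ (i < 0 ∨ j < 0))]
        obtain ⟨c1, hg1⟩ := pyGet?_isSome str1 i hneg.1 hi
        obtain ⟨c2, hg2⟩ := pyGet?_isSome str2 j hneg.2 hj
        simp only [hg1, hg2]
        by_cases heq : c1 = c2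
        · obtain ⟨⟨v, c'⟩, hp⟩ := ih (i - 1) (j - 1) cache (by omega) (by omega) (by omega)
          simp only [if_pos heq, hp]
          exact ⟨_, rfl⟩
        · obtain ⟨⟨v1, c1'⟩, hp1⟩ := ih (i - 1) j cache (by omega) (by omega) hj
          obtain ⟨⟨v2, c2'⟩, hp2⟩ := ih i (j - 1) c1' (by omega) hi (by omega)
          simp only [if_neg heq, hp1, hp2]
          exact ⟨_, rfl⟩

-- main equivalence lemma: A's returned value is B's diagonal walk
lemma aux_eq_alt (str1 str2 : String) :
    ∀ n (i j : Int) (cache : PySem.Dict String Int),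
      (i + 1).toNat + (j + 1).toNat ≤ n →
      ((cache.get? (pvKey i j)).isSome ∨ i < 0 ∨ j < 0 ∨
        (i < (str1.toList.length : Int) ∧ j < (str2.toList.length : Int))) →
      (func13Aux str1 str2 i j cache).map Prod.fst =
        some (func13AltGo str1 str2 i j cache 0) := by
  intro n
  induction n with
  | zero =>
    intro i j cache hn hpre
    rw [func13Aux]
    conv_rhs => rw [func13AltGo]
    simp only [sub_zero]
    cases hc : cache.get? (pvKey i j) with
    | some v => simp
    | none =>
      have hneg : i < 0 ∨ j < 0 := by omega
      simp only [if_pos hneg, Option.map_some]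
  | succ m ih =>
    intro i j cache hn hpre
    rw [func13Aux]
    conv_rhs => rw [func13AltGo]
    simp only [sub_zero]
    cases hc : cache.get? (pvKey i j) with
    | some v => simp
    | none =>
      by_cases hneg : i < 0 ∨ j < 0
      · simp only [if_pos hneg, Option.map_some]
      · push_neg at hneg
        simp only [if_neg (by omega : ¬ (i < 0 ∨ j < 0))]
        have hrange : i < (str1.toList.length : Int) ∧ j < (str2.toList.length : Int) := by
          rcases hpre with h | h | h | h
          · rw [hc] at h; simp at h
          · omega
          · omega
          · exact h
        obtain ⟨c1, hg1⟩ := pyGet?_isSome str1 i hneg.1 hrange.1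
        obtain ⟨c2, hg2⟩ := pyGet?_isSome str2 j hneg.2 hrange.2
        simp only [hg1, hg2]
        by_cases heq : c1 = c2
        · have hih := ih (i - 1) (j - 1) cache (by omega)
            (Or.inr (Or.inr (Or.inr ⟨by omega, by omega⟩)))
          obtain ⟨⟨v, c'⟩, hp, hv⟩ := Option.map_eq_some_iff.mp hih
          simp only [if_pos heq, hp, Option.map_some]
          have hnn : ¬ (c1 ≠ c2) := not_not_intro heq
          have hshift := altGo_shift str1 str2 cache (i + 1).toNat i j 0 (by omega)
          rw [zero_add] at hshift
          rw [if_neg hnn, zero_add, hshift, ← hv]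
        · obtain ⟨⟨v1, c1'⟩, hp1⟩ := aux_total str1 str2 ((i + 1).toNat + (j + 1).toNat)
            (i - 1) j cache (by omega) (by omega) hrange.2
          obtain ⟨⟨v2, c2'⟩, hp2⟩ := aux_total str1 str2 ((i + 1).toNat + (j + 1).toNat)
            i (j - 1) c1' (by omega) hrange.1 (by omega)
          simp [heq, hp1, hp2]

-- ===== VERDICT (by name: the statement is the Claim_ definition above) =====
theorem func13_spec : Claim_equal_func13 := by
  intro str1 str2 i j cache _ hpre
  unfold Spec_func13 func13 func13_alt
  have hpre' : ((PySem.Dict.mk cache).get? (pvKey i j)).isSome ∨ i < 0 ∨ j < 0 ∨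
      (i < (str1.toList.length : Int) ∧ j < (str2.toList.length : Int)) := by
    unfold Pre_func13 at hpre
    rcases hpre with h | h
    · left
      rw [Option.isSome_iff_ne_none]
      intro hnone
      rw [PySem.Dict.get?_eq_none_iff_not_mem_keys] at hnone
      exact hnone (by simpa [PySem.Dict.keys] using h)
    · right; exact h
  have hmain := aux_eq_alt str1 str2 ((i + 1).toNat + (j + 1).toNat) i j
    (PySem.Dict.mk cache) le_rfl hpre'
  obtain ⟨⟨v, c'⟩, hp, hv⟩ := Option.map_eq_some_iff.mp hmain
  rw [hp]
  exact hv
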